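-- pv_equiv track=rewrite | github.com/Stefan4556/University | FundamentalsOfProgramming/Fundamentele Programarii Laboratoare/Laborator 13/exemplu.py | verificare_suplimentara
-- ===== SOURCE A (Python) =====
-- def verifica_indici_cosn(l):
--
--     for i in range(0,len(l)-1):
--         if abs(l[i]-l[i+1]) != 1:
--             return False
--     return True
--
-- def verificare_suplimentara(l,lista):
--
--     lista_poz = []
--
--     for i in range(0,len(l)):
--
--         for j in range(0,len(lista)):
--
--             if lista[j] == l[i]:
--
--                 lista_poz.append(j)
--                 break
--
--     return verifica_indici_cosn(lista_poz)
-- ===== SOURCE B (Python) =====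
-- def verificare_suplimentara(l, lista):
--     prev = None
--     for x in l:
--         if x in lista:
--             idx = lista.index(x)
--             if prev is not None and abs(idx - prev) != 1:
--                 return False
--             prev = idx
--     return True
-- ===== Notes on version B (the rewrite author's own statement) =====
-- stated objective: faster
-- what changed: Single pass keeping only the previous retained index with early exit on the first non-consecutive pair, instead of building an intermediate position list via nested scans and then checking it with a second helper loop.
import Mathlib
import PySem

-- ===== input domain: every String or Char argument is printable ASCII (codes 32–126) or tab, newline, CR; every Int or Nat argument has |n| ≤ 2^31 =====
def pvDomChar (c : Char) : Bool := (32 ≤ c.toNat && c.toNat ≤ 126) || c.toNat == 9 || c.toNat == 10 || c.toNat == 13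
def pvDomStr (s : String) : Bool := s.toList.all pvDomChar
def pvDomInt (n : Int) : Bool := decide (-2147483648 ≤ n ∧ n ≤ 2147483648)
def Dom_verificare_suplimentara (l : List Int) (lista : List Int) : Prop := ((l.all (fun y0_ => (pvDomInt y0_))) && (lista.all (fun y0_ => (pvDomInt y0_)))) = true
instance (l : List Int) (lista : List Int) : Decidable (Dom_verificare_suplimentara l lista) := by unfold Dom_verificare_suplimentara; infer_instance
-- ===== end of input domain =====

-- B replaces A's nested-scan position list + helper check by one pass keeping only the previous retained index (simpler).


-- ===== PORT A =====
-- inner loop: for j in range(len(lista)): if lista[j] == x: append j; break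
def pvInnerA (x : Int) : List Int → Nat → Option Nat
  | [], _ => none
  | y :: rest, j => if y = x then some j else pvInnerA x rest (j + 1)

-- verifica_indici_cosn: for i in range(len(l)-1): if abs(l[i]-l[i+1]) != 1: return False
def pvCosn : List Nat → Bool
  | a :: b :: r => if ((a : Int) - (b : Int)).natAbs ≠ 1 then false else pvCosn (b :: r)
  | _ => true

def verificare_suplimentara (l : List Int) (lista : List Int) : Bool :=
  pvCosn (l.foldl (fun acc x =>
    match pvInnerA x lista 0 with
    | some j => acc ++ [j]
    | none => acc) [])

-- ===== PORT B =====
def pvAltGo (lista : List Int) : List Int → Option Nat → Bool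
  | [], _ => true
  | x :: rest, prev =>
    match PySem.List.index? lista x with
    | none => pvAltGo lista rest prev
    | some idx =>
      match prev with
      | none => pvAltGo lista rest (some idx)
      | some p => if ((idx : Int) - (p : Int)).natAbs ≠ 1 then false else pvAltGo lista rest (some idx)

def verificare_suplimentara_alt (l : List Int) (lista : List Int) : Bool :=
  pvAltGo lista l none

-- ===== PRECONDITION & SPEC =====
def Spec_verificare_suplimentara (l : List Int) (lista : List Int) (out : Bool) : Prop := out = verificare_suplimentara_alt l lista
instance (l : List Int) (lista : List Int) (out : Bool) : Decidable (Spec_verificare_suplimentara l lista out) := by unfold Spec_verificare_suplimentara; infer_instance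

-- ===== CLAIM (what is proved, stated in full; the proofs are below) =====
def Claim_equal_verificare_suplimentara : Prop := ∀ (l : List Int) (lista : List Int), Dom_verificare_suplimentara l lista → Spec_verificare_suplimentara l lista (verificare_suplimentara l lista)

-- ===== LEMMAS AND PROOFS =====

lemma natAbs_swap (a b : Nat) : ((a : Int) - (b : Int)).natAbs = ((b : Int) - (a : Int)).natAbs := by omega

lemma pvInnerA_eq (x : Int) (lista : List Int) (j : Nat) :
    pvInnerA x lista j = (PySem.List.index? lista x).map (· + j) := by
  induction lista generalizing j with
  | nil => simp [pvInnerA, PySem.List.index?_eq_idxOf?]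
  | cons y rest ih =>
    by_cases h : y = x
    · subst h; rw [PySem.List.index?_cons_self]; simp [pvInnerA]
    · rw [pvInnerA, if_neg h, PySem.List.index?_cons_of_ne rest h, ih]
      cases PySem.List.index? rest x with
      | none => rfl
      | some k => simp; omega

lemma foldA_eq (lista : List Int) (l : List Int) (acc : List Nat) :
    (l.foldl (fun acc x =>
      match pvInnerA x lista 0 with
      | some j => acc ++ [j]
      | none => acc) acc)
    = acc ++ l.filterMap (fun x => PySem.List.index? lista x) := by
  induction l generalizing acc with
  | nil => simp
  | cons x rest ih =>
    rw [List.foldl_cons, List.filterMap_cons, pvInnerA_eq]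
    cases h : PySem.List.index? lista x with
    | none => simpa using ih acc
    | some k => simp [ih, List.append_assoc]

lemma pvAltGo_eq (lista : List Int) (l : List Int) (prev : Option Nat) :
    pvAltGo lista l prev = pvCosn (prev.toList ++ l.filterMap (fun x => PySem.List.index? lista x)) := by
  induction l generalizing prev with
  | nil => cases prev <;> simp [pvAltGo, pvCosn]
  | cons x rest ih =>
    rw [List.filterMap_cons]
    cases h : PySem.List.index? lista x with
    | none => rw [pvAltGo, h]; exact ih prev
    | some idx =>
      cases prev with
      | none => rw [pvAltGo, h]; simpa using ih (some idx)
      | some p =>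
        rw [pvAltGo, h]
        simp only [Option.toList, List.cons_append, List.nil_append, pvCosn]
        rw [natAbs_swap p idx]
        split_ifs with hd
        · rfl
        · simpa using ih (some idx)

-- ===== VERDICT (by name: the statement is the Claim_ definition above) =====
theorem verificare_suplimentara_spec : Claim_equal_verificare_suplimentara := by
  intro l lista _
  unfold Spec_verificare_suplimentara verificare_suplimentara verificare_suplimentara_alt
  rw [foldA_eq, pvAltGo_eq]
  simp
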